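-- pv_equiv track=rewrite | github.com/waselu/ElswordListManager | ElswordRaidManager.py | findEmojiByClassName
-- ===== SOURCE A (Python) =====
-- charArray = [
--     #Elsword
--     {"classNaming": ["KE", "KnightEmperor", "Elsword1"], "emoji": "<:KE:828899757359366166>"},
--     {"classNaming": ["RM", "RuneMaster", "Elsword2"], "emoji": "<:RM:828906428584296470>"},
--     {"classNaming": ["IM", "Immortal", "Elsword3"], "emoji": "<:IM:828906440948973568>"},
--
--     #Aisha
--     {"classNaming": ["AeS", "AetherSage", "Aisha1"], "emoji": "<:AeS:828906464453066822>"},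
--     {"classNaming": ["Oz", "OzSorcerer", "Aisha2"], "emoji": "<:OZ:828906512742612992>"},
--     {"classNaming": ["MtM", "Metamorphy", "Aisha3"], "emoji": "<:MtM:828906520639963197>"},
--
--     #Rena
--     {"classNaming": ["AN", "Anemos", "Rena1"], "emoji": "<:AN:828906527023824917>"},
--     {"classNaming": ["DaB", "DayBreaker", "Rena2"], "emoji": "<:DaB:828906534837682176>"},
--     {"classNaming": ["TW", "Twilight", "Rena3"], "emoji": "<:TW:828906542303805472>"},
--
--     #Raven
--     {"classNaming": ["FB", "FuriousBlade", "Raven1"], "emoji": "<:FB:828906550957572147>"},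
--     {"classNaming": ["RH", "RageHearts", "Raven2"], "emoji": "<:RH:828906557462806548>"},
--     {"classNaming": ["NI", "NovaImperator", "Raven3"], "emoji": "<:NI:828906563854401557>"},
--
--     #Eve
--     {"classNaming": ["CU", "CodeUlimate", "Eve1"], "emoji": "<:CU:829692771001434123>"},
--     {"classNaming": ["CE", "CodeEmpress", "Eve2"], "emoji": "<:CE:829692784616144937>"},
--     {"classNaming": ["CS", "CodeSariel", "Eve3"], "emoji": "<:CS:829692792996626492>"},
--
--     #Chung
--     {"classNaming": ["CC", "CometCrusader", "Chung1"], "emoji": "<:CC:829692798965907506>"},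
--     {"classNaming": ["FP", "FatamPhantom", "Chung2"], "emoji": "<:FP:829692805261426768>"},
--     {"classNaming": ["CeT", "Centurion", "Chung3"], "emoji": "<:CeT:829692812248350740>"},
--
--     #Ara
--     {"classNaming": ["Aps", "Apsara", "Ara1"], "emoji": "<:Aps:829692821556297768>"},
--     {"classNaming": ["Devi", "Ara2"], "emoji": "<:Devi:829692829151526953>"},
--     {"classNaming": ["Shakti", "SH", "Ara3"], "emoji": "<:SH:829692836790009856>"},
--
--     #Elesis
--     {"classNaming": ["ES", "EmpireSword", "Elesis1"], "emoji": "<:ES:829692843583864833>"},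
--     {"classNaming": ["FL", "FlameLord", "Elesis2"], "emoji": "<:FL:829692850333417493>"},
--     {"classNaming": ["BQ", "BloodyQueen", "Elesis3"], "emoji": "<:BQ:829692858138099713>"},
--
--     #Add
--     {"classNaming": ["DB", "DoomBringer", "Add1"], "emoji": "<:DB:829692865458339840>"},
--     {"classNaming": ["DoM", "Dominator", "Add2"], "emoji": "<:DoM:829692872197668884>"},
--     {"classNaming": ["MP", "MadParadox", "Add3"], "emoji": "<:MP:829692880179298334>"},
--
--     #Luciel
--     {"classNaming": ["CaT", "Catastrophe", "Luciel1"], "emoji": "<:CaT:829692887818174484>"},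
--     {"classNaming": ["IN", "Innocent", "Luciel2"], "emoji": "<:IN:829692895664930816>"},
--     {"classNaming": ["DiA", "Diangelion", "Luciel3"], "emoji": "<:DiA:829692905031073842>"},
--
--     #Rose
--     {"classNaming": ["TB", "TempestBurster", "Rose1"], "emoji": "<:TB:829692997171806218>"},
--     {"classNaming": ["BlM", "BM", "BlackMassacre", "Rose2"], "emoji": "<:BlM:829693008319610920>"},
--     {"classNaming": ["MN", "Minerva", "Rose3"], "emoji": "<:MN:829693015697260544>"},
--     {"classNaming": ["PO", "PrimeOperator", "Rose4"], "emoji": "<:PO:829693022211014677>"},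
--
--     #Ain
--     {"classNaming": ["RI", "Richter", "Ain1"], "emoji": "<:RI:829693030138642453>"},
--     {"classNaming": ["BL", "Bluhen", "Ain2"], "emoji": "<:BL:829693036996460576>"},
--     {"classNaming": ["HR", "Herrscher", "Ain3"], "emoji": "<:HR:829693044478443580>"},
--
--     #Laby
--     {"classNaming": ["EtW", "EternityWinner", "Laby1"], "emoji": "<:EtW:829693052670312499>"},
--     {"classNaming": ["RaS", "RadiantSoul", "Laby2"], "emoji": "<:RaS:829693063508656140>"},
--     {"classNaming": ["NL", "Nisha", "NishaLabyrinth", "Laby3"], "emoji": "<:NL:829693114222379008>"},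
--
--     #Noah
--     {"classNaming": ["LB", "Liberator", "Noah1"], "emoji": "<:LB:829693124698832936>"},
--     {"classNaming": ["CL", "Celestia", "Noah2"], "emoji": "<:CL:829693133171326978>"},
--     {"classNaming": ["NP", "NyxPieta", "Noah3"], "emoji": "<:NP:829693142995435582>"},
-- ]
--
-- def findElswordClass(elswordClass):
--     for index, classTuple in enumerate(charArray):
--         for classNaming in classTuple["classNaming"]:
--             if classNaming.lower() == elswordClass.lower():
--                 return {"name": classTuple["classNaming"][0], "index": index}
--     return None
--
-- def findEmojiByClassName(elswordClass):
--     realName = findElswordClass(elswordClass)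
--     if not realName:
--         return None
--     realName = realName["name"]
--     for classTuple in charArray:
--        if realName == classTuple["classNaming"][0]:
--            return classTuple["emoji"]
--     return None
-- ===== SOURCE B (Python) =====
-- # Precomputed flat lookup table: lowercased alias -> emoji (data from charArray,
-- # flattened once; all lowercased aliases are distinct).
-- _ALIAS_TO_EMOJI = {
--     'ke': '<:KE:828899757359366166>',
--     'knightemperor': '<:KE:828899757359366166>',
--     'elsword1': '<:KE:828899757359366166>',
--     'rm': '<:RM:828906428584296470>',
--     'runemaster': '<:RM:828906428584296470>',
--     'elsword2': '<:RM:828906428584296470>',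
--     'im': '<:IM:828906440948973568>',
--     'immortal': '<:IM:828906440948973568>',
--     'elsword3': '<:IM:828906440948973568>',
--     'aes': '<:AeS:828906464453066822>',
--     'aethersage': '<:AeS:828906464453066822>',
--     'aisha1': '<:AeS:828906464453066822>',
--     'oz': '<:OZ:828906512742612992>',
--     'ozsorcerer': '<:OZ:828906512742612992>',
--     'aisha2': '<:OZ:828906512742612992>',
--     'mtm': '<:MtM:828906520639963197>',
--     'metamorphy': '<:MtM:828906520639963197>',
--     'aisha3': '<:MtM:828906520639963197>',
--     'an': '<:AN:828906527023824917>',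
--     'anemos': '<:AN:828906527023824917>',
--     'rena1': '<:AN:828906527023824917>',
--     'dab': '<:DaB:828906534837682176>',
--     'daybreaker': '<:DaB:828906534837682176>',
--     'rena2': '<:DaB:828906534837682176>',
--     'tw': '<:TW:828906542303805472>',
--     'twilight': '<:TW:828906542303805472>',
--     'rena3': '<:TW:828906542303805472>',
--     'fb': '<:FB:828906550957572147>',
--     'furiousblade': '<:FB:828906550957572147>',
--     'raven1': '<:FB:828906550957572147>',
--     'rh': '<:RH:828906557462806548>',
--     'ragehearts': '<:RH:828906557462806548>',
--     'raven2': '<:RH:828906557462806548>',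
--     'ni': '<:NI:828906563854401557>',
--     'novaimperator': '<:NI:828906563854401557>',
--     'raven3': '<:NI:828906563854401557>',
--     'cu': '<:CU:829692771001434123>',
--     'codeulimate': '<:CU:829692771001434123>',
--     'eve1': '<:CU:829692771001434123>',
--     'ce': '<:CE:829692784616144937>',
--     'codeempress': '<:CE:829692784616144937>',
--     'eve2': '<:CE:829692784616144937>',
--     'cs': '<:CS:829692792996626492>',
--     'codesariel': '<:CS:829692792996626492>',
--     'eve3': '<:CS:829692792996626492>',
--     'cc': '<:CC:829692798965907506>',
--     'cometcrusader': '<:CC:829692798965907506>',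
--     'chung1': '<:CC:829692798965907506>',
--     'fp': '<:FP:829692805261426768>',
--     'fatamphantom': '<:FP:829692805261426768>',
--     'chung2': '<:FP:829692805261426768>',
--     'cet': '<:CeT:829692812248350740>',
--     'centurion': '<:CeT:829692812248350740>',
--     'chung3': '<:CeT:829692812248350740>',
--     'aps': '<:Aps:829692821556297768>',
--     'apsara': '<:Aps:829692821556297768>',
--     'ara1': '<:Aps:829692821556297768>',
--     'devi': '<:Devi:829692829151526953>',
--     'ara2': '<:Devi:829692829151526953>',
--     'shakti': '<:SH:829692836790009856>',
--     'sh': '<:SH:829692836790009856>',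
--     'ara3': '<:SH:829692836790009856>',
--     'es': '<:ES:829692843583864833>',
--     'empiresword': '<:ES:829692843583864833>',
--     'elesis1': '<:ES:829692843583864833>',
--     'fl': '<:FL:829692850333417493>',
--     'flamelord': '<:FL:829692850333417493>',
--     'elesis2': '<:FL:829692850333417493>',
--     'bq': '<:BQ:829692858138099713>',
--     'bloodyqueen': '<:BQ:829692858138099713>',
--     'elesis3': '<:BQ:829692858138099713>',
--     'db': '<:DB:829692865458339840>',
--     'doombringer': '<:DB:829692865458339840>',
--     'add1': '<:DB:829692865458339840>',
--     'dom': '<:DoM:829692872197668884>',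
--     'dominator': '<:DoM:829692872197668884>',
--     'add2': '<:DoM:829692872197668884>',
--     'mp': '<:MP:829692880179298334>',
--     'madparadox': '<:MP:829692880179298334>',
--     'add3': '<:MP:829692880179298334>',
--     'cat': '<:CaT:829692887818174484>',
--     'catastrophe': '<:CaT:829692887818174484>',
--     'luciel1': '<:CaT:829692887818174484>',
--     'in': '<:IN:829692895664930816>',
--     'innocent': '<:IN:829692895664930816>',
--     'luciel2': '<:IN:829692895664930816>',
--     'dia': '<:DiA:829692905031073842>',
--     'diangelion': '<:DiA:829692905031073842>',
--     'luciel3': '<:DiA:829692905031073842>',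
--     'tb': '<:TB:829692997171806218>',
--     'tempestburster': '<:TB:829692997171806218>',
--     'rose1': '<:TB:829692997171806218>',
--     'blm': '<:BlM:829693008319610920>',
--     'bm': '<:BlM:829693008319610920>',
--     'blackmassacre': '<:BlM:829693008319610920>',
--     'rose2': '<:BlM:829693008319610920>',
--     'mn': '<:MN:829693015697260544>',
--     'minerva': '<:MN:829693015697260544>',
--     'rose3': '<:MN:829693015697260544>',
--     'po': '<:PO:829693022211014677>',
--     'primeoperator': '<:PO:829693022211014677>',
--     'rose4': '<:PO:829693022211014677>',
--     'ri': '<:RI:829693030138642453>',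
--     'richter': '<:RI:829693030138642453>',
--     'ain1': '<:RI:829693030138642453>',
--     'bl': '<:BL:829693036996460576>',
--     'bluhen': '<:BL:829693036996460576>',
--     'ain2': '<:BL:829693036996460576>',
--     'hr': '<:HR:829693044478443580>',
--     'herrscher': '<:HR:829693044478443580>',
--     'ain3': '<:HR:829693044478443580>',
--     'etw': '<:EtW:829693052670312499>',
--     'eternitywinner': '<:EtW:829693052670312499>',
--     'laby1': '<:EtW:829693052670312499>',
--     'ras': '<:RaS:829693063508656140>',
--     'radiantsoul': '<:RaS:829693063508656140>',
--     'laby2': '<:RaS:829693063508656140>',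
--     'nl': '<:NL:829693114222379008>',
--     'nisha': '<:NL:829693114222379008>',
--     'nishalabyrinth': '<:NL:829693114222379008>',
--     'laby3': '<:NL:829693114222379008>',
--     'lb': '<:LB:829693124698832936>',
--     'liberator': '<:LB:829693124698832936>',
--     'noah1': '<:LB:829693124698832936>',
--     'cl': '<:CL:829693133171326978>',
--     'celestia': '<:CL:829693133171326978>',
--     'noah2': '<:CL:829693133171326978>',
--     'np': '<:NP:829693142995435582>',
--     'nyxpieta': '<:NP:829693142995435582>',
--     'noah3': '<:NP:829693142995435582>',
-- }
--
-- def findEmojiByClassName(elswordClass):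
--     return _ALIAS_TO_EMOJI.get(elswordClass.lower())
-- ===== Notes on version B (the rewrite author's own statement) =====
-- stated objective: faster
-- what changed: Replaces the nested case-insensitive scan over charArray plus the redundant second scan by a single .get lookup in a flat precomputed dict literal mapping each lowercased alias to its emoji.
import Mathlib
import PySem

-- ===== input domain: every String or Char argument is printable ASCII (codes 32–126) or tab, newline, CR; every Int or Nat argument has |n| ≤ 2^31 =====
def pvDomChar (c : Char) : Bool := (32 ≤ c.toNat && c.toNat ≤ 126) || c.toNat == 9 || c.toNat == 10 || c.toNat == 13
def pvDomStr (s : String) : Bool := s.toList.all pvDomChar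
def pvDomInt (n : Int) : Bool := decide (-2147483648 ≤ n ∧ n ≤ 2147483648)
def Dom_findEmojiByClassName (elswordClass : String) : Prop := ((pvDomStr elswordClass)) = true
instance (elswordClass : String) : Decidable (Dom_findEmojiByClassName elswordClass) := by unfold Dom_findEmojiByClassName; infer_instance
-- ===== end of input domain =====

-- B replaces A's nested case-insensitive scan plus redundant second scan by a single lookup in a
-- flat precomputed table (lowercased alias -> emoji), written out once (objective: faster, constant-factor).

-- ===== PORT A =====
-- A's module-level data: charArray, each entry (classNaming, emoji)
def charArray : List (List String × String) := [
  (["KE", "KnightEmperor", "Elsword1"], "<:KE:828899757359366166>"),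
  (["RM", "RuneMaster", "Elsword2"], "<:RM:828906428584296470>"),
  (["IM", "Immortal", "Elsword3"], "<:IM:828906440948973568>"),
  (["AeS", "AetherSage", "Aisha1"], "<:AeS:828906464453066822>"),
  (["Oz", "OzSorcerer", "Aisha2"], "<:OZ:828906512742612992>"),
  (["MtM", "Metamorphy", "Aisha3"], "<:MtM:828906520639963197>"),
  (["AN", "Anemos", "Rena1"], "<:AN:828906527023824917>"),
  (["DaB", "DayBreaker", "Rena2"], "<:DaB:828906534837682176>"),
  (["TW", "Twilight", "Rena3"], "<:TW:828906542303805472>"),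
  (["FB", "FuriousBlade", "Raven1"], "<:FB:828906550957572147>"),
  (["RH", "RageHearts", "Raven2"], "<:RH:828906557462806548>"),
  (["NI", "NovaImperator", "Raven3"], "<:NI:828906563854401557>"),
  (["CU", "CodeUlimate", "Eve1"], "<:CU:829692771001434123>"),
  (["CE", "CodeEmpress", "Eve2"], "<:CE:829692784616144937>"),
  (["CS", "CodeSariel", "Eve3"], "<:CS:829692792996626492>"),
  (["CC", "CometCrusader", "Chung1"], "<:CC:829692798965907506>"),
  (["FP", "FatamPhantom", "Chung2"], "<:FP:829692805261426768>"),
  (["CeT", "Centurion", "Chung3"], "<:CeT:829692812248350740>"),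
  (["Aps", "Apsara", "Ara1"], "<:Aps:829692821556297768>"),
  (["Devi", "Ara2"], "<:Devi:829692829151526953>"),
  (["Shakti", "SH", "Ara3"], "<:SH:829692836790009856>"),
  (["ES", "EmpireSword", "Elesis1"], "<:ES:829692843583864833>"),
  (["FL", "FlameLord", "Elesis2"], "<:FL:829692850333417493>"),
  (["BQ", "BloodyQueen", "Elesis3"], "<:BQ:829692858138099713>"),
  (["DB", "DoomBringer", "Add1"], "<:DB:829692865458339840>"),
  (["DoM", "Dominator", "Add2"], "<:DoM:829692872197668884>"),
  (["MP", "MadParadox", "Add3"], "<:MP:829692880179298334>"),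
  (["CaT", "Catastrophe", "Luciel1"], "<:CaT:829692887818174484>"),
  (["IN", "Innocent", "Luciel2"], "<:IN:829692895664930816>"),
  (["DiA", "Diangelion", "Luciel3"], "<:DiA:829692905031073842>"),
  (["TB", "TempestBurster", "Rose1"], "<:TB:829692997171806218>"),
  (["BlM", "BM", "BlackMassacre", "Rose2"], "<:BlM:829693008319610920>"),
  (["MN", "Minerva", "Rose3"], "<:MN:829693015697260544>"),
  (["PO", "PrimeOperator", "Rose4"], "<:PO:829693022211014677>"),
  (["RI", "Richter", "Ain1"], "<:RI:829693030138642453>"),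
  (["BL", "Bluhen", "Ain2"], "<:BL:829693036996460576>"),
  (["HR", "Herrscher", "Ain3"], "<:HR:829693044478443580>"),
  (["EtW", "EternityWinner", "Laby1"], "<:EtW:829693052670312499>"),
  (["RaS", "RadiantSoul", "Laby2"], "<:RaS:829693063508656140>"),
  (["NL", "Nisha", "NishaLabyrinth", "Laby3"], "<:NL:829693114222379008>"),
  (["LB", "Liberator", "Noah1"], "<:LB:829693124698832936>"),
  (["CL", "Celestia", "Noah2"], "<:CL:829693133171326978>"),
  (["NP", "NyxPieta", "Noah3"], "<:NP:829693142995435582>")]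

-- inner 'for classNaming in classTuple["classNaming"]' loop; 'first' is classTuple["classNaming"][0]
-- (headD "" — every entry's classNaming is nonempty, so the Python indexing never raises)
def classLoopInner (naming : List String) (first : String) (i : Int) (elswordClass : String) : Option (String × Int) :=
  match naming with
  | [] => none
  | a :: rest =>
    if PySem.Str.lower a == PySem.Str.lower elswordClass then some (first, i)
    else classLoopInner rest first i elswordClass

-- outer 'for index, classTuple in enumerate(charArray)' loop
def classLoopOuter (l : List (Int × (List String × String))) (elswordClass : String) : Option (String × Int) :=
  match l with
  | [] => none
  | (i, ct) :: rest =>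
    match classLoopInner ct.1 (ct.1.headD "") i elswordClass with
    | some r => some r
    | none => classLoopOuter rest elswordClass

def findElswordClass (elswordClass : String) : Option (String × Int) :=
  classLoopOuter (PySem.List.enumerate charArray) elswordClass

-- second loop of findEmojiByClassName: 'if realName == classTuple["classNaming"][0]: return emoji'
def emojiLoop (l : List (List String × String)) (realName : String) : Option String :=
  match l with
  | [] => none
  | ct :: rest => if realName == ct.1.headD "" then some ct.2 else emojiLoop rest realName

def findEmojiByClassName (elswordClass : String) : Option String :=
  match findElswordClass elswordClass with
  | none => none
  | some r => emojiLoop charArray r.1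

-- ===== PORT B =====
-- Source B's module-level dict literal _ALIAS_TO_EMOJI (all keys distinct)
def aliasPairs : List (String × String) := [
  ("ke", "<:KE:828899757359366166>"),
  ("knightemperor", "<:KE:828899757359366166>"),
  ("elsword1", "<:KE:828899757359366166>"),
  ("rm", "<:RM:828906428584296470>"),
  ("runemaster", "<:RM:828906428584296470>"),
  ("elsword2", "<:RM:828906428584296470>"),
  ("im", "<:IM:828906440948973568>"),
  ("immortal", "<:IM:828906440948973568>"),
  ("elsword3", "<:IM:828906440948973568>"),
  ("aes", "<:AeS:828906464453066822>"),
  ("aethersage", "<:AeS:828906464453066822>"),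
  ("aisha1", "<:AeS:828906464453066822>"),
  ("oz", "<:OZ:828906512742612992>"),
  ("ozsorcerer", "<:OZ:828906512742612992>"),
  ("aisha2", "<:OZ:828906512742612992>"),
  ("mtm", "<:MtM:828906520639963197>"),
  ("metamorphy", "<:MtM:828906520639963197>"),
  ("aisha3", "<:MtM:828906520639963197>"),
  ("an", "<:AN:828906527023824917>"),
  ("anemos", "<:AN:828906527023824917>"),
  ("rena1", "<:AN:828906527023824917>"),
  ("dab", "<:DaB:828906534837682176>"),
  ("daybreaker", "<:DaB:828906534837682176>"),
  ("rena2", "<:DaB:828906534837682176>"),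
  ("tw", "<:TW:828906542303805472>"),
  ("twilight", "<:TW:828906542303805472>"),
  ("rena3", "<:TW:828906542303805472>"),
  ("fb", "<:FB:828906550957572147>"),
  ("furiousblade", "<:FB:828906550957572147>"),
  ("raven1", "<:FB:828906550957572147>"),
  ("rh", "<:RH:828906557462806548>"),
  ("ragehearts", "<:RH:828906557462806548>"),
  ("raven2", "<:RH:828906557462806548>"),
  ("ni", "<:NI:828906563854401557>"),
  ("novaimperator", "<:NI:828906563854401557>"),
  ("raven3", "<:NI:828906563854401557>"),
  ("cu", "<:CU:829692771001434123>"),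
  ("codeulimate", "<:CU:829692771001434123>"),
  ("eve1", "<:CU:829692771001434123>"),
  ("ce", "<:CE:829692784616144937>"),
  ("codeempress", "<:CE:829692784616144937>"),
  ("eve2", "<:CE:829692784616144937>"),
  ("cs", "<:CS:829692792996626492>"),
  ("codesariel", "<:CS:829692792996626492>"),
  ("eve3", "<:CS:829692792996626492>"),
  ("cc", "<:CC:829692798965907506>"),
  ("cometcrusader", "<:CC:829692798965907506>"),
  ("chung1", "<:CC:829692798965907506>"),
  ("fp", "<:FP:829692805261426768>"),
  ("fatamphantom", "<:FP:829692805261426768>"),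
  ("chung2", "<:FP:829692805261426768>"),
  ("cet", "<:CeT:829692812248350740>"),
  ("centurion", "<:CeT:829692812248350740>"),
  ("chung3", "<:CeT:829692812248350740>"),
  ("aps", "<:Aps:829692821556297768>"),
  ("apsara", "<:Aps:829692821556297768>"),
  ("ara1", "<:Aps:829692821556297768>"),
  ("devi", "<:Devi:829692829151526953>"),
  ("ara2", "<:Devi:829692829151526953>"),
  ("shakti", "<:SH:829692836790009856>"),
  ("sh", "<:SH:829692836790009856>"),
  ("ara3", "<:SH:829692836790009856>"),
  ("es", "<:ES:829692843583864833>"),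
  ("empiresword", "<:ES:829692843583864833>"),
  ("elesis1", "<:ES:829692843583864833>"),
  ("fl", "<:FL:829692850333417493>"),
  ("flamelord", "<:FL:829692850333417493>"),
  ("elesis2", "<:FL:829692850333417493>"),
  ("bq", "<:BQ:829692858138099713>"),
  ("bloodyqueen", "<:BQ:829692858138099713>"),
  ("elesis3", "<:BQ:829692858138099713>"),
  ("db", "<:DB:829692865458339840>"),
  ("doombringer", "<:DB:829692865458339840>"),
  ("add1", "<:DB:829692865458339840>"),
  ("dom", "<:DoM:829692872197668884>"),
  ("dominator", "<:DoM:829692872197668884>"),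
  ("add2", "<:DoM:829692872197668884>"),
  ("mp", "<:MP:829692880179298334>"),
  ("madparadox", "<:MP:829692880179298334>"),
  ("add3", "<:MP:829692880179298334>"),
  ("cat", "<:CaT:829692887818174484>"),
  ("catastrophe", "<:CaT:829692887818174484>"),
  ("luciel1", "<:CaT:829692887818174484>"),
  ("in", "<:IN:829692895664930816>"),
  ("innocent", "<:IN:829692895664930816>"),
  ("luciel2", "<:IN:829692895664930816>"),
  ("dia", "<:DiA:829692905031073842>"),
  ("diangelion", "<:DiA:829692905031073842>"),
  ("luciel3", "<:DiA:829692905031073842>"),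
  ("tb", "<:TB:829692997171806218>"),
  ("tempestburster", "<:TB:829692997171806218>"),
  ("rose1", "<:TB:829692997171806218>"),
  ("blm", "<:BlM:829693008319610920>"),
  ("bm", "<:BlM:829693008319610920>"),
  ("blackmassacre", "<:BlM:829693008319610920>"),
  ("rose2", "<:BlM:829693008319610920>"),
  ("mn", "<:MN:829693015697260544>"),
  ("minerva", "<:MN:829693015697260544>"),
  ("rose3", "<:MN:829693015697260544>"),
  ("po", "<:PO:829693022211014677>"),
  ("primeoperator", "<:PO:829693022211014677>"),
  ("rose4", "<:PO:829693022211014677>"),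
  ("ri", "<:RI:829693030138642453>"),
  ("richter", "<:RI:829693030138642453>"),
  ("ain1", "<:RI:829693030138642453>"),
  ("bl", "<:BL:829693036996460576>"),
  ("bluhen", "<:BL:829693036996460576>"),
  ("ain2", "<:BL:829693036996460576>"),
  ("hr", "<:HR:829693044478443580>"),
  ("herrscher", "<:HR:829693044478443580>"),
  ("ain3", "<:HR:829693044478443580>"),
  ("etw", "<:EtW:829693052670312499>"),
  ("eternitywinner", "<:EtW:829693052670312499>"),
  ("laby1", "<:EtW:829693052670312499>"),
  ("ras", "<:RaS:829693063508656140>"),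
  ("radiantsoul", "<:RaS:829693063508656140>"),
  ("laby2", "<:RaS:829693063508656140>"),
  ("nl", "<:NL:829693114222379008>"),
  ("nisha", "<:NL:829693114222379008>"),
  ("nishalabyrinth", "<:NL:829693114222379008>"),
  ("laby3", "<:NL:829693114222379008>"),
  ("lb", "<:LB:829693124698832936>"),
  ("liberator", "<:LB:829693124698832936>"),
  ("noah1", "<:LB:829693124698832936>"),
  ("cl", "<:CL:829693133171326978>"),
  ("celestia", "<:CL:829693133171326978>"),
  ("noah2", "<:CL:829693133171326978>"),
  ("np", "<:NP:829693142995435582>"),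
  ("nyxpieta", "<:NP:829693142995435582>"),
  ("noah3", "<:NP:829693142995435582>")]

def aliasToEmoji : PySem.Dict String String := PySem.Dict.ofList aliasPairs

def findEmojiByClassName_alt (elswordClass : String) : Option String :=
  aliasToEmoji.get? (PySem.Str.lower elswordClass)

-- ===== PRECONDITION & SPEC =====
def Spec_findEmojiByClassName (elswordClass : String) (out : Option String) : Prop := out = findEmojiByClassName_alt elswordClass
instance (elswordClass : String) (out : Option String) : Decidable (Spec_findEmojiByClassName elswordClass out) := by unfold Spec_findEmojiByClassName; infer_instance

-- ===== CLAIM =====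
def Claim_equal_findEmojiByClassName : Prop := ∀ (elswordClass : String), Dom_findEmojiByClassName elswordClass → Spec_findEmojiByClassName elswordClass (findEmojiByClassName elswordClass)

-- ===== LEMMAS AND PROOFS =====

-- first-match grouped scan: what A reduces to (key k = lower of the argument)
def scanFirst (l : List (List String × String)) (k : String) : Option String :=
  match l with
  | [] => none
  | ct :: rest => if ct.1.any (fun a => PySem.Str.lower a == k) then some ct.2 else scanFirst rest k

-- first-match association lookup (same direction of == as Dict.get?_mk_cons)
def assocGet (l : List (String × String)) (x : String) : Option String :=
  match l with
  | [] => none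
  | (k, v) :: rest => if k == x then some v else assocGet rest x

-- flattening A's grouped data into (lowered alias, emoji) pairs
def flatPairs (l : List (List String × String)) : List (String × String) :=
  l.flatMap (fun ct => ct.1.map (fun a => (PySem.Str.lower a, ct.2)))

theorem classLoopInner_eq (naming : List String) (first : String) (i : Int) (s : String) :
    classLoopInner naming first i s =
      if naming.any (fun a => PySem.Str.lower a == PySem.Str.lower s) then some (first, i) else none := by
  induction naming with
  | nil => simp [classLoopInner]
  | cons a rest ih =>
    simp only [classLoopInner, List.any_cons, ih]
    by_cases h : PySem.Str.lower a == PySem.Str.lower s <;> simp [h]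

theorem outer_eq_scanFirst (l : List (Int × (List String × String))) (s : String)
    (h : ∀ p ∈ l, emojiLoop charArray (p.2.1.headD "") = some p.2.2) :
    (match classLoopOuter l s with
     | none => none
     | some r => emojiLoop charArray r.1) = scanFirst (l.map Prod.snd) (PySem.Str.lower s) := by
  induction l with
  | nil => simp [classLoopOuter, scanFirst]
  | cons p rest ih =>
    obtain ⟨i, ct⟩ := p
    have hh := h (i, ct) (by simp)
    simp only [classLoopOuter, classLoopInner_eq, List.map_cons, scanFirst]
    by_cases hc : (ct.1.any fun a => PySem.Str.lower a == PySem.Str.lower s) = true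
    · simp only [hc, if_pos]
      simpa [List.headD] using hh
    · simp only [hc]
      simpa [hc] using ih (fun q hq => h q (by simp [hq]))

set_option maxRecDepth 40000 in
theorem A_eq_scanFirst (s : String) :
    findEmojiByClassName s = scanFirst charArray (PySem.Str.lower s) := by
  have h : ∀ p ∈ PySem.List.enumerate charArray 0, emojiLoop charArray (p.2.1.headD "") = some p.2.2 := by
    decide
  have hmain := outer_eq_scanFirst (PySem.List.enumerate charArray 0) s h
  rw [PySem.List.map_snd_enumerate] at hmain
  unfold findEmojiByClassName findElswordClass
  exact hmain

theorem assocGet_append (xs ys : List (String × String)) (x : String) :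
    assocGet (xs ++ ys) x = match assocGet xs x with | some v => some v | none => assocGet ys x := by
  induction xs with
  | nil => simp [assocGet]
  | cons p rest ih =>
    obtain ⟨k, v⟩ := p
    simp only [List.cons_append, assocGet]
    by_cases h : (k == x) = true <;> simp [h, ih]

theorem assocGet_mapped (al : List String) (em : String) (x : String) :
    assocGet (al.map (fun a => (PySem.Str.lower a, em))) x =
      if al.any (fun a => PySem.Str.lower a == x) then some em else none := by
  induction al with
  | nil => simp [assocGet]
  | cons a rest ih =>
    simp only [List.map_cons, assocGet, List.any_cons, ih]
    by_cases h : (PySem.Str.lower a == x) = true <;> simp [h]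

theorem scanFirst_eq_assoc (l : List (List String × String)) (k : String) :
    scanFirst l k = assocGet (flatPairs l) k := by
  induction l with
  | nil => simp [scanFirst, flatPairs, assocGet]
  | cons ct rest ih =>
    simp only [scanFirst, flatPairs, List.flatMap_cons, assocGet_append, assocGet_mapped]
    by_cases h : (ct.1.any fun a => PySem.Str.lower a == k) = true
    · simp [h]
    · simp [h, ih, flatPairs]

theorem get?_mk_eq_assoc (l : List (String × String)) (x : String) :
    (PySem.Dict.mk l).get? x = assocGet l x := by
  induction l with
  | nil => simp [assocGet, PySem.Dict.get?]
  | cons p rest ih =>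
    obtain ⟨k, v⟩ := p
    rw [PySem.Dict.get?_mk_cons, assocGet, ih]

set_option maxRecDepth 80000 in
theorem aliasToEmoji_mk : aliasToEmoji = PySem.Dict.mk aliasPairs := by decide

set_option maxRecDepth 80000 in
theorem flatPairs_charArray : flatPairs charArray = aliasPairs := by decide

-- ===== VERDICT =====
set_option maxRecDepth 80000 in
theorem findEmojiByClassName_spec : Claim_equal_findEmojiByClassName := by
  intro s _
  unfold Spec_findEmojiByClassName findEmojiByClassName_alt
  rw [A_eq_scanFirst, scanFirst_eq_assoc, flatPairs_charArray, aliasToEmoji_mk, get?_mk_eq_assoc]
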